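-- pv_equiv track=rewrite | github.com/fredpottier/KBGPT | src/knowbase/claimfirst/clustering/contradiction_rules.py | _same_unit_family
-- ===== SOURCE A (Python) =====
-- _UNIT_FAMILIES = [
--     {"mg", "g", "kg", "µg", "mcg"},
--     {"ml", "l", "dl", "cl"},
--     {"mg/dl", "mmol/l", "g/l"},
--     {"mg/24h", "g/g", "mg/g"},
--     {"ms", "s", "min", "h", "hr", "hrs"},
--     {"mm", "cm", "m", "km"},
--     {"%", "pct", "percent"},
-- ]
--
-- def _normalize_unit(unit: str) -> str:
--     """Normalise une unité pour la comparaison."""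
--     return unit.strip().lower().replace(" ", "")
--
-- def _same_unit_family(unit_a: str, unit_b: str) -> bool:
--     """Vérifie si deux unités appartiennent à la même famille convertible."""
--     a = _normalize_unit(unit_a)
--     b = _normalize_unit(unit_b)
--     if a == b:
--         return False  # Même unité = pas un problème de conversion
--     for family in _UNIT_FAMILIES:
--         norm_family = {_normalize_unit(u) for u in family}
--         if a in norm_family and b in norm_family:
--             return True
--     return False
-- ===== SOURCE B (Python) =====
-- _UNIT_FAMILIES = [
--     {"mg", "g", "kg", "µg", "mcg"},
--     {"ml", "l", "dl", "cl"},
--     {"mg/dl", "mmol/l", "g/l"},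
--     {"mg/24h", "g/g", "mg/g"},
--     {"ms", "s", "min", "h", "hr", "hrs"},
--     {"mm", "cm", "m", "km"},
--     {"%", "pct", "percent"},
-- ]
--
-- def _normalize_unit(unit: str) -> str:
--     return unit.strip().lower().replace(" ", "")
--
-- # Built once at import time: normalized unit -> family index.
-- UNIT_TO_FAMILY = {
--     _normalize_unit(u): idx
--     for idx, family in enumerate(_UNIT_FAMILIES)
--     for u in family
-- }
--
-- def _same_unit_family(unit_a: str, unit_b: str) -> bool:
--     a = _normalize_unit(unit_a)
--     b = _normalize_unit(unit_b)
--     if a == b: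
--         return False
--     fa = UNIT_TO_FAMILY.get(a)
--     fb = UNIT_TO_FAMILY.get(b)
--     return fa is not None and fa == fb
-- ===== Notes on version B (the rewrite author's own statement) =====
-- stated objective: simpler
-- what changed: Replaces the per-call loop over families (re-normalizing every family member on each call) with a module-level dict from normalized unit to family index built once at import; the function becomes two O(1) lookups and an index comparison.
import Mathlib
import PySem

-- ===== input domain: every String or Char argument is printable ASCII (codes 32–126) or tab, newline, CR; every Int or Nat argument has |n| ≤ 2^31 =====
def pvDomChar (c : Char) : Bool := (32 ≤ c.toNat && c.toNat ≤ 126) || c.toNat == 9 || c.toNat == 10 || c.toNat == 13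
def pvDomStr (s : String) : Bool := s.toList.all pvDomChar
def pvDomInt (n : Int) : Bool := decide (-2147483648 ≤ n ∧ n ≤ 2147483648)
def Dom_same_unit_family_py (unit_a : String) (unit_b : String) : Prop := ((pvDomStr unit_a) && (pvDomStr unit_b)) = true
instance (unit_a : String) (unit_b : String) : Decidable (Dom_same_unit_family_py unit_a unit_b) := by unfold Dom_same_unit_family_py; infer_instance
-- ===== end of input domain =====

-- B replaces A's per-call loop over families (which re-normalizes every member each call)
-- with a dict from normalized unit to family index built once; objective: simpler.

-- ===== PORT A =====
def unitFamilies : List (PySem.Set String) :=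
  [PySem.Set.ofList ["mg", "g", "kg", "µg", "mcg"],
   PySem.Set.ofList ["ml", "l", "dl", "cl"],
   PySem.Set.ofList ["mg/dl", "mmol/l", "g/l"],
   PySem.Set.ofList ["mg/24h", "g/g", "mg/g"],
   PySem.Set.ofList ["ms", "s", "min", "h", "hr", "hrs"],
   PySem.Set.ofList ["mm", "cm", "m", "km"],
   PySem.Set.ofList ["%", "pct", "percent"]]

def normalizeUnit (unit : String) : String :=
  PySem.Str.replace (PySem.Str.lower (PySem.Str.strip unit)) " " ""

def same_unit_family_py (unit_a : String) (unit_b : String) : Bool :=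
  let a := normalizeUnit unit_a
  let b := normalizeUnit unit_b
  if a == b then false
  else
    unitFamilies.any (fun family =>
      let normFamily := PySem.Set.ofList (family.map normalizeUnit)
      PySem.Set.contains normFamily a && PySem.Set.contains normFamily b)

-- ===== PORT B =====
-- module-level dict, built once: normalized unit -> family index
def unitToFamily : PySem.Dict String Int :=
  (PySem.List.enumerate unitFamilies).foldl
    (fun d p => p.2.foldl (fun d u => d.insert (normalizeUnit u) p.1) d)
    PySem.Dict.empty

def same_unit_family_py_alt (unit_a : String) (unit_b : String) : Bool :=
  let a := normalizeUnit unit_a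
  let b := normalizeUnit unit_b
  if a == b then false
  else
    match unitToFamily.get? a with
    | none => false
    | some fa => unitToFamily.get? b == some fa

-- ===== PRECONDITION & SPEC =====
def Spec_same_unit_family_py (unit_a : String) (unit_b : String) (out : Bool) : Prop := out = same_unit_family_py_alt unit_a unit_b
instance (unit_a : String) (unit_b : String) (out : Bool) : Decidable (Spec_same_unit_family_py unit_a unit_b out) := by unfold Spec_same_unit_family_py; infer_instance

-- ===== CLAIM (what is proved, stated in full; the proofs are below) =====
def Claim_equal_same_unit_family_py : Prop := ∀ (unit_a : String) (unit_b : String), Dom_same_unit_family_py unit_a unit_b → Spec_same_unit_family_py unit_a unit_b (same_unit_family_py unit_a unit_b)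

-- ===== LEMMAS AND PROOFS =====

set_option maxRecDepth 20000
set_option maxHeartbeats 4000000

-- all dict keys (= all normalized family members)
def pvAllKeys : List String :=
  ["mg", "g", "kg", "µg", "mcg", "ml", "l", "dl", "cl", "mg/dl", "mmol/l", "g/l",
   "mg/24h", "g/g", "mg/g", "ms", "s", "min", "h", "hr", "hrs", "mm", "cm", "m", "km",
   "%", "pct", "percent"]

theorem pv_get?_none {ν : Type} (l : List (String × ν)) (a : String)
    (h : ∀ p ∈ l, (p.1 == a) = false) : (PySem.Dict.mk l).get? a = none := by
  induction l with
  | nil => rfl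
  | cons p rest ih =>
      rw [PySem.Dict.get?_mk_cons, h p (List.mem_cons_self), ih (fun q hq => h q (List.mem_cons_of_mem _ hq))]
      rfl

theorem pv_dict_eq : unitToFamily = PySem.Dict.mk
      [("mg", 0), ("g", 0), ("kg", 0), ("µg", 0), ("mcg", 0),
       ("ml", 1), ("l", 1), ("dl", 1), ("cl", 1),
       ("mg/dl", 2), ("mmol/l", 2), ("g/l", 2),
       ("mg/24h", 3), ("g/g", 3), ("mg/g", 3),
       ("ms", 4), ("s", 4), ("min", 4), ("h", 4), ("hr", 4), ("hrs", 4),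
       ("mm", 5), ("cm", 5), ("m", 5), ("km", 5),
       ("%", 6), ("pct", 6), ("percent", 6)] := by decide

theorem pv_B_core_none (a : String) (ha : a ∉ pvAllKeys) :
    unitToFamily.get? a = none := by
  rw [pv_dict_eq]
  apply pv_get?_none
  intro p hp
  rw [beq_eq_false_iff_ne]
  intro e
  apply ha
  rw [← e]
  fin_cases hp <;> decide

theorem pv_contains_false (s : PySem.Set String) (a : String)
    (hsub : ∀ x ∈ s, x ∈ pvAllKeys) (ha : a ∉ pvAllKeys) :
    PySem.Set.contains s a = false := by
  rw [PySem.Set.contains]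
  cases hmem : List.contains s a with
  | false => rfl
  | true => exact absurd (hsub a (List.contains_iff_mem.mp hmem)) ha

theorem pv_contains_all_false (a : String) (ha : a ∉ pvAllKeys) :
    ∀ fam ∈ unitFamilies,
      PySem.Set.contains (PySem.Set.ofList (fam.map normalizeUnit)) a = false := by
  intro fam hfam
  apply pv_contains_false _ _ _ ha
  fin_cases hfam <;> decide

theorem pv_A_false_left (a b : String) (ha : a ∉ pvAllKeys) :
    unitFamilies.any (fun family =>
      let normFamily := PySem.Set.ofList (family.map normalizeUnit)
      PySem.Set.contains normFamily a && PySem.Set.contains normFamily b) = false := by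
  rw [List.any_eq_false]
  intro fam hfam hq
  dsimp only at hq
  rw [pv_contains_all_false a ha fam hfam, Bool.false_and] at hq
  exact Bool.false_ne_true hq

theorem pv_A_false_right (a b : String) (hb : b ∉ pvAllKeys) :
    unitFamilies.any (fun family =>
      let normFamily := PySem.Set.ofList (family.map normalizeUnit)
      PySem.Set.contains normFamily a && PySem.Set.contains normFamily b) = false := by
  rw [List.any_eq_false]
  intro fam hfam hq
  dsimp only at hq
  rw [pv_contains_all_false b hb fam hfam, Bool.and_false] at hq
  exact Bool.false_ne_true hq

theorem pv_main (a b : String) :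
    (if a == b then false
     else unitFamilies.any (fun family =>
       let normFamily := PySem.Set.ofList (family.map normalizeUnit)
       PySem.Set.contains normFamily a && PySem.Set.contains normFamily b)) =
    (if a == b then false
     else match unitToFamily.get? a with
          | none => false
          | some fa => unitToFamily.get? b == some fa) := by
  by_cases hab : a == b
  · simp [hab]
  · simp only [hab, Bool.false_eq_true, if_false]
    by_cases ha : a ∈ pvAllKeys
    · by_cases hb : b ∈ pvAllKeys
      · rw [pv_dict_eq]
        fin_cases ha <;> fin_cases hb <;> decide
      · rw [pv_A_false_right a b hb]
        cases hga : unitToFamily.get? a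
        · rfl
        · rw [pv_B_core_none b hb]; rfl
    · rw [pv_A_false_left a b ha, pv_B_core_none a ha]

-- ===== VERDICT (by name: the statement is the Claim_ definition above) =====
theorem same_unit_family_py_spec : Claim_equal_same_unit_family_py := by
  intro unit_a unit_b _
  unfold Spec_same_unit_family_py same_unit_family_py same_unit_family_py_alt
  exact pv_main (normalizeUnit unit_a) (normalizeUnit unit_b)
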